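-- pv_equiv track=rewrite | github.com/LeeroyChangkins/ruck-item-categorization-v2 | step-2/2_2_match_items_to_bigrams.py | tokenize_alpha_preserve
-- ===== SOURCE A (Python) =====
-- from typing import Dict, List, Tuple
--
-- def tokenize_alpha_preserve(text: str) -> List[str]:
--     """Letter-only tokens (A–Z runs), preserving original casing. No regex."""
--     if not text:
--         return []
--     s = str(text)
--     out: List[str] = []
--     cur: List[str] = []
--     for ch in s:
--         o = ord(ch)
--         if (65 <= o <= 90) or (97 <= o <= 122):
--             cur.append(ch)
--         else:
--             if cur:
--                 out.append("".join(cur))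
--                 cur = []
--     if cur:
--         out.append("".join(cur))
--     return out
-- ===== SOURCE B (Python) =====
-- def tokenize_alpha_preserve(text):
--     """Letter-only tokens via maximal-run scanning (two pointers), no running buffer."""
--     if not text:
--         return []
--     s = str(text)
--
--     def is_letter(ch):
--         return ('A' <= ch <= 'Z') or ('a' <= ch <= 'z')
--
--     out = []
--     i, n = 0, len(s)
--     while i < n:
--         k = is_letter(s[i])
--         j = i + 1
--         while j < n and is_letter(s[j]) == k:
--             j += 1
--         if k:
--             out.append(s[i:j])
--         i = j
--     return out
-- ===== Notes on version B (the rewrite author's own statement) =====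
-- stated objective: alternative
-- what changed: Replaced the per-character buffer/flush state machine with a two-pointer scan that finds each maximal same-kind run at once and slices letter runs directly out of the string.
import Mathlib
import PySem

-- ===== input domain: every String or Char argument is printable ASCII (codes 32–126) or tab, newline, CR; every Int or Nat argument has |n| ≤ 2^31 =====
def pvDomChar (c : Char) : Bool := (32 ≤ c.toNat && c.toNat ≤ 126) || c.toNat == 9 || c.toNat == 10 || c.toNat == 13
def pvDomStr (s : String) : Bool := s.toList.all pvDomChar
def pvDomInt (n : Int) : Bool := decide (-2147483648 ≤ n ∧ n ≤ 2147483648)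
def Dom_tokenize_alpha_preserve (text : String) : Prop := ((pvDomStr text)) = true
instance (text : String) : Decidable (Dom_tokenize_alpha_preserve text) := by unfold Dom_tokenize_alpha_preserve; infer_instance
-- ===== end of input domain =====

-- B replaces A's per-character buffer/flush state machine with a two-pointer maximal-run scan
-- that slices letter runs out of the string directly (objective: alternative decomposition).

-- ===== PORT A =====
-- A's letter test: (65 <= ord(ch) <= 90) or (97 <= ord(ch) <= 122)
def pvOrdAl (c : Char) : Bool := (65 ≤ c.toNat && c.toNat ≤ 90) || (97 ≤ c.toNat && c.toNat ≤ 122)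

def tokenize_alpha_preserve (text : String) : List String :=
  if text = "" then []
  else
    let st := text.toList.foldl
      (fun (st : List String × List Char) ch =>
        if pvOrdAl ch then (st.1, st.2 ++ [ch])
        else if st.2 ≠ [] then (st.1 ++ [String.ofList st.2], []) else st)
      ([], [])
    if st.2 ≠ [] then st.1 ++ [String.ofList st.2] else st.1

-- ===== PORT B =====
-- B's letter test: ('A' <= ch <= 'Z') or ('a' <= ch <= 'z')
def pvLetterB (c : Char) : Bool := (decide ('A' ≤ c) && decide (c ≤ 'Z')) || (decide ('a' ≤ c) && decide (c ≤ 'z'))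

-- the while loop of Source B: find the maximal run with the same letter-kind as the head,
-- emit it when it is a letter run, continue after it
def pvRuns : List Char → List String
  | [] => []
  | c :: rest =>
    let k := pvLetterB c
    let run := c :: rest.takeWhile (fun x => pvLetterB x == k)
    let rest' := rest.dropWhile (fun x => pvLetterB x == k)
    (if k then [String.ofList run] else []) ++ pvRuns rest'
termination_by l => l.length
decreasing_by
  simpa using Nat.lt_succ_of_le (List.length_dropWhile_le ..)

def tokenize_alpha_preserve_alt (text : String) : List String :=
  if text = "" then [] else pvRuns text.toList

-- ===== PRECONDITION & SPEC =====
def Spec_tokenize_alpha_preserve (text : String) (out : List String) : Prop := out = tokenize_alpha_preserve_alt text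
instance (text : String) (out : List String) : Decidable (Spec_tokenize_alpha_preserve text out) := by unfold Spec_tokenize_alpha_preserve; infer_instance

-- ===== CLAIM (what is proved, stated in full; the proofs are below) =====
def Claim_equal_tokenize_alpha_preserve : Prop := ∀ (text : String), Dom_tokenize_alpha_preserve text → Spec_tokenize_alpha_preserve text (tokenize_alpha_preserve text)

-- ===== LEMMAS AND PROOFS =====

-- the two programs' letter predicates agree
theorem letterB_eq_ordAl (c : Char) : pvLetterB c = pvOrdAl c := by
  simp only [pvLetterB, pvOrdAl, Char.le_def, UInt32.le_iff_toNat_le, Char.toNat,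
    show 'A'.val.toNat = 65 from rfl, show 'Z'.val.toNat = 90 from rfl,
    show 'a'.val.toNat = 97 from rfl, show 'z'.val.toNat = 122 from rfl]
  rfl

-- proof intermediary: A's state machine read functionally (cur = pending letter buffer)
def pvG : List Char → List Char → List String
  | cur, [] => if cur = [] then [] else [String.ofList cur]
  | cur, c :: rest =>
    if pvOrdAl c then pvG (cur ++ [c]) rest
    else (if cur = [] then [] else [String.ofList cur]) ++ pvG [] rest

theorem foldA_eq_pvG (l : List Char) : ∀ (out : List String) (cur : List Char),
    (let st := l.foldl
      (fun (st : List String × List Char) ch =>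
        if pvOrdAl ch then (st.1, st.2 ++ [ch])
        else if st.2 ≠ [] then (st.1 ++ [String.ofList st.2], []) else st)
      (out, cur);
     if st.2 ≠ [] then st.1 ++ [String.ofList st.2] else st.1) = out ++ pvG cur l := by
  induction l with
  | nil =>
    intro out cur
    by_cases h : cur = [] <;> simp [pvG, h]
  | cons c rest ih =>
    intro out cur
    by_cases hc : pvOrdAl c = true
    · simp only [List.foldl_cons, hc, if_pos, pvG]
      exact ih out (cur ++ [c])
    · by_cases hcur : cur = []
      · simp only [List.foldl_cons, hc, hcur, pvG, Bool.false_eq_true, if_false,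
          ne_eq, not_true_eq_false, List.nil_append]
        simpa using ih out []
      · simp only [List.foldl_cons, hc, Bool.false_eq_true, ne_eq, hcur,
          not_false_eq_true, if_pos, pvG, if_neg]
        rw [ih (out ++ [String.ofList cur]) []]
        simp

-- pvG with empty buffer ignores a leading block of non-letters
theorem pvG_dropWhile (l : List Char) :
    pvG [] l = pvG [] (l.dropWhile (fun x => pvOrdAl x == false)) := by
  induction l with
  | nil => rfl
  | cons c rest ih =>
    by_cases hc : pvOrdAl c = true
    · rw [List.dropWhile_cons_of_neg (by simp [hc])]
    · rw [List.dropWhile_cons_of_pos (by simp [hc]), ← ih]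
      simp [pvG, hc]

-- pvG folds a block of letters into the buffer
theorem pvG_letters (run : List Char) : ∀ (cur rest : List Char),
    (∀ x ∈ run, pvOrdAl x = true) → pvG cur (run ++ rest) = pvG (cur ++ run) rest := by
  induction run with
  | nil => simp
  | cons c t ih =>
    intro cur rest h
    have hc : pvOrdAl c = true := h c (by simp)
    simp only [List.cons_append, pvG, hc, if_pos]
    rw [ih (cur ++ [c]) rest (fun x hx => h x (by simp [hx]))]
    simp

-- flushing a non-empty buffer when the remainder does not start with a letter
theorem pvG_flush (cur rest : List Char) (hne : cur ≠ [])
    (hrest : ∀ c t, rest = c :: t → pvOrdAl c = false) :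
    pvG cur rest = String.ofList cur :: pvG [] rest := by
  cases rest with
  | nil => simp [pvG, hne]
  | cons c t =>
    have hc : pvOrdAl c = false := hrest c t rfl
    simp [pvG, hc, hne]

theorem runs_eq_pvG (l : List Char) : pvRuns l = pvG [] l := by
  have hp : pvLetterB = pvOrdAl := funext letterB_eq_ordAl
  have hbt : (fun x => pvOrdAl x == true) = pvOrdAl := funext fun x => by
    cases pvOrdAl x <;> rfl
  generalize hn : l.length = n
  induction n using Nat.strong_induction_on generalizing l with
  | _ n ih =>
    cases l with
    | nil => simp [pvRuns, pvG]
    | cons c rest =>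
      rw [pvRuns, hp]
      by_cases hc : pvOrdAl c = true
      · simp only [hc, if_pos, hbt]
        have hall : ∀ x ∈ c :: rest.takeWhile pvOrdAl, pvOrdAl x = true := by
          intro x hx
          rcases List.mem_cons.mp hx with rfl | hx
          · exact hc
          · exact List.mem_takeWhile_imp hx
        have hlt : (rest.dropWhile pvOrdAl).length < n := by
          subst hn
          simpa using Nat.lt_succ_of_le (List.length_dropWhile_le ..)
        have hnd : ∀ d t, rest.dropWhile pvOrdAl = d :: t → pvOrdAl d = false := by
          intro d t hd
          have h0 := List.head?_dropWhile_not pvOrdAl rest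
          rw [hd] at h0
          simpa using h0
        rw [show pvG [] (c :: rest)
              = pvG [] ((c :: rest.takeWhile pvOrdAl) ++ rest.dropWhile pvOrdAl) from by
            rw [List.cons_append, List.takeWhile_append_dropWhile]]
        rw [pvG_letters _ [] _ hall, List.nil_append,
          pvG_flush _ _ (by simp) hnd, ih _ hlt _ rfl]
        rfl
      · have hcb : pvOrdAl c = false := by simpa using hc
        have hlt : (rest.dropWhile (fun x => pvOrdAl x == false)).length < n := by
          subst hn
          simpa using Nat.lt_succ_of_le (List.length_dropWhile_le ..)
        simp only [hcb, Bool.false_eq_true, if_false, List.nil_append]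
        rw [ih _ hlt _ rfl,
          show pvG [] (c :: rest) = pvG [] rest from by simp [pvG, hcb],
          pvG_dropWhile rest]

-- ===== VERDICT (by name: the statement is the Claim_ definition above) =====
theorem tokenize_alpha_preserve_spec : Claim_equal_tokenize_alpha_preserve := by
  intro text _
  unfold Spec_tokenize_alpha_preserve tokenize_alpha_preserve tokenize_alpha_preserve_alt
  by_cases h : text = ""
  · simp [h]
  · simp only [h, if_false]
    rw [runs_eq_pvG]
    simpa using foldA_eq_pvG text.toList [] []
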